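-- pv_equiv track=rewrite | github.com/Kodsport/kth-challenge-2021 | forgottenhomework/generators/generator.py | sequencer
-- ===== SOURCE A (Python) =====
-- MOD = 10**9 + 7
--
-- def mult_mat_vec(A, B):
--     n = len(B)
--     C = []
--     for Ai in A:
--         ans = 0
--         for j in range(n):
--             ans = (ans + Ai[j] * B[j]) % MOD
--         C.append(ans)
--     return C
--
-- def sequencer(mat, i, j):
--     n = len(mat)
--
--     vec = [0] * n
--     vec[j] = 1
--
--     sequence = []
--     for _ in range(2 * n + 1):
--         sequence.append(vec[i])
--         vec = mult_mat_vec(mat,vec)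
--
--     return sequence
-- ===== SOURCE B (Python) =====
-- MOD = 10**9 + 7
--
-- def sequencer(mat, i, j):
--     # Wiedemann-style bilinear projection: precompute the two Krylov families
--     # v_q = M^q e_j (q = 0..n) and w_p = e_i^T M^p (p = 0..n) once, then each
--     # sequence entry e_i^T M^k e_j is the cross dot product w_p . v_q with
--     # p = min(k, n), q = k - p, reduced mod MOD.
--     n = len(mat)
--
--     v = [0] * n
--     v[j] = 1
--     vs = [v]
--     for _ in range(n):
--         v = [sum(row[c] * v[c] for c in range(n)) % MOD for row in mat]
--         vs.append(v)
--
--     w = [0] * n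
--     w[i] = 1
--     ws = [w]
--     for _ in range(n):
--         w = [sum(w[r] * mat[r][c] for r in range(n)) % MOD for c in range(n)]
--         ws.append(w)
--
--     seq = []
--     for k in range(2 * n + 1):
--         p = min(k, n)
--         q = k - p
--         seq.append(sum(ws[p][r] * vs[q][r] for r in range(n)) % MOD)
--     return seq
-- ===== Notes on version B (the rewrite author's own statement) =====
-- stated objective: alternative
-- what changed: B uses Wiedemann's bilinear-projection decomposition: it precomputes the two Krylov families v_q = M^q e_j and w_p = e_i^T M^p for p,q <= n in two staged build loops, then forms each sequence entry as a single cross dot product w_min(k,n) . v_(k-min(k,n)) mod MOD, instead of A's single column vector iterated 2n+1 times with its coordinate read each step.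
import Mathlib
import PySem

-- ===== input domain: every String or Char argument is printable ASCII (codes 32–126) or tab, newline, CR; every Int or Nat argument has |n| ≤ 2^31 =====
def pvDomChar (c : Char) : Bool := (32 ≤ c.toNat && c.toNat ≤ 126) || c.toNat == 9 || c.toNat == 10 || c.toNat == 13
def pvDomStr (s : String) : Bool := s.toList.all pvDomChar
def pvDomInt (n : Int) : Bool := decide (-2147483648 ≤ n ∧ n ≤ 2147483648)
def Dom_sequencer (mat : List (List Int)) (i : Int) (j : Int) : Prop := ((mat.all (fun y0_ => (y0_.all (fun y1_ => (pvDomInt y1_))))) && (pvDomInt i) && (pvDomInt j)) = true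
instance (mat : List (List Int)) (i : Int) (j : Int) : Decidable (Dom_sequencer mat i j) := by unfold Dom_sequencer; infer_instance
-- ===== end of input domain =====

-- B replaces A's single column vector iterated 2n+1 times by Wiedemann's bilinear projection:
-- two Krylov families v_q = M^q e_j and w_p = e_i^T M^p (p,q ≤ n) built once, each sequence
-- entry then a cross dot product w_{min(k,n)} · v_{k-min(k,n)} mod MOD; objective: alternative.

-- ===== PORT A =====
def pvMOD : Int := 10 ^ 9 + 7

-- mult_mat_vec: row-by-row dot products with stepwise reduction mod MOD
def multMatVec (A : List (List Int)) (B : List Int) : List Int :=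
  A.map (fun Ai =>
    (PySem.List.pyRange 0 (PySem.List.len B) 1).foldl
      (fun ans jj => (ans + PySem.List.pyGetD Ai jj 0 * PySem.List.pyGetD B jj 0) % pvMOD) 0)

-- the 'for _ in range(2*n+1)' loop of A, as structural recursion on the trip count
def seqLoopA (mat : List (List Int)) (i : Int) : Nat → List Int → List Int
  | 0, _ => []
  | k+1, vec => PySem.List.pyGetD vec i 0 :: seqLoopA mat i k (multMatVec mat vec)

def sequencer (mat : List (List Int)) (i : Int) (j : Int) : List Int :=
  let n := mat.length
  seqLoopA mat i (2 * n + 1) (PySem.List.pySetD (List.replicate n 0) j 1)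

-- ===== PORT B =====
-- v = [sum(row[c] * v[c] for c in range(n)) % MOD for row in mat]
def rightStep (mat : List (List Int)) (v : List Int) : List Int :=
  mat.map (fun row =>
    ((PySem.List.pyRange 0 (mat.length : Int) 1).foldl
      (fun a c => a + PySem.List.pyGetD row c 0 * PySem.List.pyGetD v c 0) 0) % pvMOD)

-- w = [sum(w[r] * mat[r][c] for r in range(n)) % MOD for c in range(n)]
def leftStep (mat : List (List Int)) (w : List Int) : List Int :=
  (PySem.List.pyRange 0 (mat.length : Int) 1).map (fun c =>
    ((PySem.List.pyRange 0 (mat.length : Int) 1).foldl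
      (fun a r => a + PySem.List.pyGetD w r 0 *
        PySem.List.pyGetD (PySem.List.pyGetD mat r []) c 0) 0) % pvMOD)

-- 'xs = [x]; for _ in range(K): x = step(x); xs.append(x)'
def krylov (step : List Int → List Int) : Nat → List Int → List (List Int)
  | 0, v => [v]
  | k+1, v => v :: krylov step k (step v)

def sequencer_alt (mat : List (List Int)) (i : Int) (j : Int) : List Int :=
  let n := mat.length
  let vs := krylov (rightStep mat) n (PySem.List.pySetD (List.replicate n 0) j 1)
  let ws := krylov (leftStep mat) n (PySem.List.pySetD (List.replicate n 0) i 1)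
  (PySem.List.pyRange 0 ((2 * n + 1 : Nat) : Int) 1).map (fun k =>
    let p := min k (n : Int)
    let q := k - p
    ((PySem.List.pyRange 0 (n : Int) 1).foldl
      (fun a r => a + PySem.List.pyGetD (PySem.List.pyGetD ws p []) r 0 *
                      PySem.List.pyGetD (PySem.List.pyGetD vs q []) r 0) 0) % pvMOD)

-- ===== PRECONDITION & SPEC =====
-- Pre_ excludes exactly the inputs where Python A raises: an empty matrix or an out-of-range i/j
-- (IndexError on vec[j]=1 / vec[i]) and a matrix with some row shorter than len(mat) (IndexError on Ai[j]).
def Pre_sequencer (mat : List (List Int)) (i : Int) (j : Int) : Prop :=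
  -(mat.length : Int) ≤ i ∧ i < mat.length ∧ -(mat.length : Int) ≤ j ∧ j < mat.length ∧
  ∀ row ∈ mat, mat.length ≤ row.length

instance (mat : List (List Int)) (i : Int) (j : Int) : Decidable (Pre_sequencer mat i j) := by
  unfold Pre_sequencer; infer_instance

def pvWitness_sequencer : List (List Int) × Int × Int := ([[2, 1], [3, 4]], 0, 1)

def Spec_sequencer (mat : List (List Int)) (i : Int) (j : Int) (out : List Int) : Prop := out = sequencer_alt mat i j
instance (mat : List (List Int)) (i : Int) (j : Int) (out : List Int) : Decidable (Spec_sequencer mat i j out) := by unfold Spec_sequencer; infer_instance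

-- ===== CLAIM (what is proved, stated in full; the proofs are below) =====
def Claim_equal_sequencer : Prop := ∀ (mat : List (List Int)) (i : Int) (j : Int), Dom_sequencer mat i j → Pre_sequencer mat i j → Spec_sequencer mat i j (sequencer mat i j)

-- ===== LEMMAS AND PROOFS =====

-- normalised (Python) index
def nrm (n : Nat) (i : Int) : Nat := (if i < 0 then i + n else i).toNat

def ent (mat : List (List Int)) (r c : Nat) : Int := (mat.getD r []).getD c 0

def delta (m : Nat) : Nat → Int := fun r => if r = m then 1 else 0

-- column iterates (A's model, over ℤ without reduction): mat^k · v
def colIt (a : Nat → Nat → Int) (n : Nat) (v : Nat → Int) : Nat → Nat → Int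
  | 0 => v
  | k+1 => fun r => ∑ c ∈ Finset.range n, a r c * colIt a n v k c

-- row iterates (B's model): w · mat^k
def rowIt (a : Nat → Nat → Int) (n : Nat) (w : Nat → Int) : Nat → Nat → Int
  | 0 => w
  | k+1 => fun c => ∑ r ∈ Finset.range n, rowIt a n w k r * a r c

def stepFold (t : Int → Int) (n : Nat) : Int :=
  (PySem.List.pyRange 0 (n : Int) 1).foldl (fun ans jj => (ans + t jj) % pvMOD) 0

lemma stepFold_succ (t : Int → Int) (n : Nat) :
    stepFold t (n+1) = (stepFold t n + t n) % pvMOD := by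
  unfold stepFold
  rw [show ((n+1 : Nat) : Int) = (n : Int) + 1 by push_cast; ring,
    PySem.List.pyRange_one_succ_right (by positivity), List.foldl_append]
  rfl

lemma stepFold_emod (t : Int → Int) (n : Nat) : stepFold t n % pvMOD = stepFold t n := by
  induction n with
  | zero => rfl
  | succ m _ => rw [stepFold_succ]; exact Int.emod_emod_of_dvd _ dvd_rfl

lemma stepFold_modeq (t : Int → Int) (n : Nat) :
    stepFold t n ≡ (∑ k ∈ Finset.range n, t k) [ZMOD pvMOD] := by
  induction n with
  | zero => rfl
  | succ m ih =>
    rw [stepFold_succ, Finset.sum_range_succ]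
    calc (stepFold t m + t m) % pvMOD
        ≡ stepFold t m + t m [ZMOD pvMOD] := Int.emod_emod_of_dvd _ dvd_rfl
      _ ≡ (∑ k ∈ Finset.range m, t k) + t m [ZMOD pvMOD] := ih.add_right _

lemma sum_modeq {s : Finset ℕ} {f g : ℕ → Int} (h : ∀ r ∈ s, f r ≡ g r [ZMOD pvMOD]) :
    (∑ r ∈ s, f r) ≡ (∑ r ∈ s, g r) [ZMOD pvMOD] := by
  classical
  induction s using Finset.induction with
  | empty => rfl
  | insert a s ha ih =>
    rw [Finset.sum_insert ha, Finset.sum_insert ha]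
    exact (h a (Finset.mem_insert_self a s)).add (ih fun r hr => h r (Finset.mem_insert_of_mem hr))

-- pyGetD / pySetD at a Python-valid (possibly negative) index
lemma pyGetD_nrm (xs : List Int) (i : Int) (d : Int)
    (h1 : -(xs.length : Int) ≤ i) (h2 : i < xs.length) :
    PySem.List.pyGetD xs i d = xs.getD (nrm xs.length i) d := by
  by_cases h0 : i < 0
  · have hv : xs.length - (-i).toNat = (i + xs.length).toNat := by omega
    simp only [PySem.List.pyGetD, PySem.List.pyGet?, PySem.List.pyIdx?, nrm, List.getD,
      if_neg (by omega : ¬ 0 ≤ i), if_pos h1, if_pos h0, hv, Option.bind_some]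
  · simp only [PySem.List.pyGetD, PySem.List.pyGet?, PySem.List.pyIdx?, nrm, List.getD,
      if_pos (by omega : 0 ≤ i), if_pos h2, if_neg h0, Option.bind_some]

lemma pySetD_nrm (xs : List Int) (i : Int) (v : Int)
    (h1 : -(xs.length : Int) ≤ i) (h2 : i < xs.length) :
    PySem.List.pySetD xs i v = xs.set (nrm xs.length i) v := by
  by_cases h0 : i < 0
  · have hv : xs.length - (-i).toNat = (i + xs.length).toNat := by omega
    simp only [PySem.List.pySetD, PySem.List.pySet?, PySem.List.pyIdx?, nrm,
      if_neg (by omega : ¬ 0 ≤ i), if_pos h1, if_pos h0, hv, Option.map_some, Option.getD_some]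
  · simp only [PySem.List.pySetD, PySem.List.pySet?, PySem.List.pyIdx?, nrm,
      if_pos (by omega : 0 ≤ i), if_pos h2, if_neg h0, Option.map_some, Option.getD_some]

-- entry characterisation of A's mult_mat_vec
lemma multMatVec_getD (mat : List (List Int)) (v : List Int) (r : Nat) (hr : r < mat.length) :
    (multMatVec mat v).getD r 0 =
      stepFold (fun jj => PySem.List.pyGetD (mat.getD r []) jj 0 * PySem.List.pyGetD v jj 0)
        v.length := by
  rw [multMatVec, stepFold, List.getD_eq_getElem _ _ (by simpa using hr), List.getElem_map,
    List.getD_eq_getElem _ _ hr]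
  simp

lemma length_multMatVec (mat : List (List Int)) (v : List Int) :
    (multMatVec mat v).length = mat.length := by simp [multMatVec]

-- a plain sum-accumulating fold over range(n)
lemma plainFold_eq (t : Int → Int) : ∀ (n : Nat) (s : Int),
    (PySem.List.pyRange 0 (n : Int) 1).foldl (fun a c => a + t c) s
      = s + ∑ k ∈ Finset.range n, t (k : Int) := by
  intro n
  induction n with
  | zero => intro s; simp [PySem.List.pyRange_one_eq_nil]
  | succ m ih =>
    intro s
    rw [show ((m+1 : Nat) : Int) = (m : Int) + 1 by push_cast; ring,
      PySem.List.pyRange_one_succ_right (by positivity), List.foldl_append]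
    simp only [List.foldl_cons, List.foldl_nil]
    rw [ih, Finset.sum_range_succ]
    ring

lemma map_pyRange_eq (f : Int → Int) : ∀ (m : Nat),
    (PySem.List.pyRange 0 (m : Int) 1).map f = (List.range m).map (fun (t : Nat) => f (t : Int)) := by
  intro m
  induction m with
  | zero => simp [PySem.List.pyRange_one_eq_nil]
  | succ k ih =>
    rw [show ((k+1 : Nat) : Int) = (k : Int) + 1 by push_cast; ring,
      PySem.List.pyRange_one_succ_right (by positivity), List.map_append, ih,
      List.range_succ, List.map_append]
    rfl

-- entry characterisations of B's two comprehension steps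
lemma rightStep_len (mat : List (List Int)) (v : List Int) :
    (rightStep mat v).length = mat.length := by simp [rightStep]

lemma rightStep_getD (mat : List (List Int)) (v : List Int) (r : Nat) (hr : r < mat.length) :
    (rightStep mat v).getD r 0 =
      (∑ c ∈ Finset.range mat.length,
        PySem.List.pyGetD (mat.getD r []) (c : Int) 0 * PySem.List.pyGetD v (c : Int) 0) % pvMOD := by
  rw [rightStep, List.getD_eq_getElem _ _ (by simpa using hr), List.getElem_map,
    List.getD_eq_getElem _ _ hr]
  rw [plainFold_eq (fun c => PySem.List.pyGetD mat[r] c 0 * PySem.List.pyGetD v c 0), zero_add]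

lemma leftStep_len (mat : List (List Int)) (w : List Int) :
    (leftStep mat w).length = mat.length := by
  simp [leftStep, PySem.List.length_pyRange_one]

lemma leftStep_getD (mat : List (List Int)) (w : List Int) (c : Nat) (hc : c < mat.length) :
    (leftStep mat w).getD c 0 =
      (∑ r ∈ Finset.range mat.length,
        PySem.List.pyGetD w (r : Int) 0 *
          PySem.List.pyGetD (PySem.List.pyGetD mat (r : Int) []) (c : Int) 0) % pvMOD := by
  rw [leftStep, map_pyRange_eq _ mat.length, List.getD_eq_getElem _ _ (by simpa using hc), List.getElem_map,
    List.getElem_range]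
  rw [plainFold_eq (fun r => PySem.List.pyGetD w r 0 *
    PySem.List.pyGetD (PySem.List.pyGetD mat r []) (c : Int) 0), zero_add]

-- the Krylov list holds the iterates
lemma krylov_getD (step : List Int → List Int) :
    ∀ (K : Nat) (v : List Int) (t : Nat), t ≤ K →
      (krylov step K v).getD t [] = step^[t] v := by
  intro K
  induction K with
  | zero =>
    intro v t ht
    have : t = 0 := by omega
    subst this; rfl
  | succ m ih =>
    intro v t ht
    cases t with
    | zero => rfl
    | succ s =>
      rw [show krylov step (m+1) v = v :: krylov step m (step v) from rfl,
        List.getD_cons_succ, ih (step v) s (by omega), ← Function.iterate_succ_apply]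

-- duality over ℤ: e_i^T · (mat^k · e_j) = (e_i^T · mat^k) · e_j
def dualS (a : Nat → Nat → Int) (n : Nat) (i' j' : Nat) (m k : Nat) : Int :=
  ∑ r ∈ Finset.range n, rowIt a n (delta i') m r * colIt a n (delta j') k r

lemma dualS_swap (a : Nat → Nat → Int) (n : Nat) (i' j' : Nat) (m k : Nat) :
    dualS a n i' j' m (k+1) = dualS a n i' j' (m+1) k := by
  unfold dualS
  simp only [colIt, rowIt, Finset.mul_sum, Finset.sum_mul]
  rw [Finset.sum_comm]
  apply Finset.sum_congr rfl; intro c _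
  apply Finset.sum_congr rfl; intro r _
  ring

lemma dualS_shift (a : Nat → Nat → Int) (n : Nat) (i' j' : Nat) :
    ∀ k m, dualS a n i' j' m k = dualS a n i' j' (m+k) 0 := by
  intro k
  induction k with
  | zero => intro m; rfl
  | succ s ih => intro m; rw [dualS_swap, ih (m+1)]; congr 1; omega

lemma dualS_left (a : Nat → Nat → Int) (n : Nat) (i' j' : Nat) (hi : i' < n) (k : Nat) :
    dualS a n i' j' 0 k = colIt a n (delta j') k i' := by
  unfold dualS
  simp only [rowIt, delta, ite_mul, one_mul, zero_mul]
  rw [Finset.sum_ite_eq' (Finset.range n)]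
  simp [Finset.mem_range.mpr hi]

lemma dualS_right (a : Nat → Nat → Int) (n : Nat) (i' j' : Nat) (hj : j' < n) (k : Nat) :
    dualS a n i' j' k 0 = rowIt a n (delta i') k j' := by
  unfold dualS
  simp only [colIt, delta, mul_ite, mul_one, mul_zero]
  rw [Finset.sum_ite_eq' (Finset.range n)]
  simp [Finset.mem_range.mpr hj]

lemma dual (a : Nat → Nat → Int) (n : Nat) (i' j' : Nat) (hi : i' < n) (hj : j' < n) (k : Nat) :
    colIt a n (delta j') k i' = rowIt a n (delta i') k j' := by
  rw [← dualS_left a n i' j' hi, dualS_shift, ← dualS_right a n i' j' hj]; norm_num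

-- the initial vector, entry by entry
lemma init_getD (n : Nat) (p m : Nat) (hp : p < n) :
    ((List.replicate n 0).set p (1 : Int)).getD m 0 = delta p m := by
  rw [List.getD_eq_getElem?_getD, List.getElem?_set, List.getElem?_replicate, delta]
  by_cases hm : p = m
  · subst hm
    rw [if_pos rfl, if_pos (by simpa using hp), if_pos rfl]
    rfl
  · rw [if_neg hm, if_neg (fun h : m = p => hm h.symm)]
    by_cases hmn : m < n <;> simp [hmn]

-- A's iterates: length preserved, entries congruent to the column model
lemma A_iter (mat : List (List Int)) (j' : Nat) (hj : j' < mat.length) (t : Nat) :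
    ((multMatVec mat)^[t] ((List.replicate mat.length 0).set j' 1)).length = mat.length ∧
    ∀ r : Nat, r < mat.length →
      ((multMatVec mat)^[t] ((List.replicate mat.length 0).set j' 1)).getD r 0 ≡
        colIt (ent mat) mat.length (delta j') t r [ZMOD pvMOD] := by
  induction t with
  | zero =>
    refine ⟨by simp, fun r _ => ?_⟩
    rw [Function.iterate_zero_apply, init_getD _ _ _ hj]
    exact Int.ModEq.refl _
  | succ s ih =>
    obtain ⟨ihlen, ihget⟩ := ih
    rw [Function.iterate_succ_apply']
    refine ⟨length_multMatVec _ _, fun r hr => ?_⟩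
    rw [multMatVec_getD _ _ _ hr, ihlen]
    calc stepFold (fun jj => PySem.List.pyGetD (mat.getD r []) jj 0 *
            PySem.List.pyGetD ((multMatVec mat)^[s] ((List.replicate mat.length 0).set j' 1)) jj 0)
          mat.length
        ≡ ∑ c ∈ Finset.range mat.length, PySem.List.pyGetD (mat.getD r []) (c : Int) 0 *
            PySem.List.pyGetD ((multMatVec mat)^[s] ((List.replicate mat.length 0).set j' 1)) (c : Int) 0
          [ZMOD pvMOD] := stepFold_modeq _ _
      _ ≡ ∑ c ∈ Finset.range mat.length, ent mat r c * colIt (ent mat) mat.length (delta j') s c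
          [ZMOD pvMOD] := by
          apply sum_modeq
          intro c hc
          rw [PySem.List.pyGetD_natCast, PySem.List.pyGetD_natCast]
          exact (ihget c (Finset.mem_range.mp hc)).mul_left _
      _ = colIt (ent mat) mat.length (delta j') (s+1) r := rfl

-- B's right iterates: length preserved, entries congruent to the column model
lemma R_iter (mat : List (List Int)) (j' : Nat) (hj : j' < mat.length) (t : Nat) :
    ((rightStep mat)^[t] ((List.replicate mat.length 0).set j' 1)).length = mat.length ∧
    ∀ r : Nat, r < mat.length →
      ((rightStep mat)^[t] ((List.replicate mat.length 0).set j' 1)).getD r 0 ≡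
        colIt (ent mat) mat.length (delta j') t r [ZMOD pvMOD] := by
  induction t with
  | zero =>
    refine ⟨by simp, fun r _ => ?_⟩
    rw [Function.iterate_zero_apply, init_getD _ _ _ hj]
    exact Int.ModEq.refl _
  | succ s ih =>
    obtain ⟨_, ihget⟩ := ih
    rw [Function.iterate_succ_apply']
    refine ⟨rightStep_len _ _, fun r hr => ?_⟩
    rw [rightStep_getD _ _ _ hr]
    calc (∑ c ∈ Finset.range mat.length, PySem.List.pyGetD (mat.getD r []) (c : Int) 0 *
            PySem.List.pyGetD ((rightStep mat)^[s] ((List.replicate mat.length 0).set j' 1)) (c : Int) 0)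
          % pvMOD
        ≡ ∑ c ∈ Finset.range mat.length, PySem.List.pyGetD (mat.getD r []) (c : Int) 0 *
            PySem.List.pyGetD ((rightStep mat)^[s] ((List.replicate mat.length 0).set j' 1)) (c : Int) 0
          [ZMOD pvMOD] := Int.emod_emod_of_dvd _ dvd_rfl
      _ ≡ ∑ c ∈ Finset.range mat.length, ent mat r c * colIt (ent mat) mat.length (delta j') s c
          [ZMOD pvMOD] := by
          apply sum_modeq
          intro c hc
          rw [PySem.List.pyGetD_natCast, PySem.List.pyGetD_natCast]
          exact (ihget c (Finset.mem_range.mp hc)).mul_left _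
      _ = colIt (ent mat) mat.length (delta j') (s+1) r := rfl

-- B's left iterates: length preserved, entries congruent to the row model
lemma L_iter (mat : List (List Int)) (i' : Nat) (hi : i' < mat.length) (t : Nat) :
    ((leftStep mat)^[t] ((List.replicate mat.length 0).set i' 1)).length = mat.length ∧
    ∀ c : Nat, c < mat.length →
      ((leftStep mat)^[t] ((List.replicate mat.length 0).set i' 1)).getD c 0 ≡
        rowIt (ent mat) mat.length (delta i') t c [ZMOD pvMOD] := by
  induction t with
  | zero =>
    refine ⟨by simp, fun c _ => ?_⟩
    rw [Function.iterate_zero_apply, init_getD _ _ _ hi]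
    exact Int.ModEq.refl _
  | succ s ih =>
    obtain ⟨_, ihget⟩ := ih
    rw [Function.iterate_succ_apply']
    refine ⟨leftStep_len _ _, fun c hc => ?_⟩
    rw [leftStep_getD _ _ _ hc]
    calc (∑ r ∈ Finset.range mat.length,
            PySem.List.pyGetD ((leftStep mat)^[s] ((List.replicate mat.length 0).set i' 1)) (r : Int) 0 *
            PySem.List.pyGetD (PySem.List.pyGetD mat (r : Int) []) (c : Int) 0) % pvMOD
        ≡ ∑ r ∈ Finset.range mat.length,
            PySem.List.pyGetD ((leftStep mat)^[s] ((List.replicate mat.length 0).set i' 1)) (r : Int) 0 *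
            PySem.List.pyGetD (PySem.List.pyGetD mat (r : Int) []) (c : Int) 0
          [ZMOD pvMOD] := Int.emod_emod_of_dvd _ dvd_rfl
      _ ≡ ∑ r ∈ Finset.range mat.length, rowIt (ent mat) mat.length (delta i') s r * ent mat r c
          [ZMOD pvMOD] := by
          apply sum_modeq
          intro r hr
          rw [PySem.List.pyGetD_natCast, PySem.List.pyGetD_natCast, PySem.List.pyGetD_natCast]
          exact (ihget r (Finset.mem_range.mp hr)).mul_right _
      _ = rowIt (ent mat) mat.length (delta i') (s+1) c := rfl

-- canonical residues for A after at least one multiplication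
lemma A_canon (mat : List (List Int)) (v : List Int) (r : Nat) (hr : r < mat.length) :
    (multMatVec mat v).getD r 0 % pvMOD = (multMatVec mat v).getD r 0 := by
  rw [multMatVec_getD _ _ _ hr]; exact stepFold_emod _ _

-- A's loop as a map over the trip counter
lemma seqLoopA_eq (mat : List (List Int)) (i : Int) : ∀ (K : Nat) (v : List Int),
    seqLoopA mat i K v =
      (List.range K).map (fun t => PySem.List.pyGetD ((multMatVec mat)^[t] v) i 0) := by
  intro K
  induction K with
  | zero => intro v; rfl
  | succ k ih =>
    intro v
    rw [seqLoopA, ih, List.range_succ_eq_map, List.map_cons, List.map_map]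
    simp [Function.comp_def, Function.iterate_succ_apply]

-- ===== VERDICT (by name: the statement is the Claim_ definition above) =====
theorem sequencer_spec : Claim_equal_sequencer := by
  intro mat i j _ hPre
  obtain ⟨hi1, hi2, hj1, hj2, _⟩ := hPre
  unfold Spec_sequencer
  rw [show sequencer mat i j = seqLoopA mat i (2 * mat.length + 1)
        (PySem.List.pySetD (List.replicate mat.length 0) j 1) from rfl]
  simp only [sequencer_alt]
  set n := mat.length with hn
  have hi' : nrm n i < n := by unfold nrm; omega
  have hj' : nrm n j < n := by unfold nrm; omega
  rw [pySetD_nrm _ _ _ (by simpa using hj1) (by simpa using hj2),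
    pySetD_nrm _ _ _ (by simpa using hi1) (by simpa using hi2)]
  simp only [List.length_replicate]
  rw [seqLoopA_eq, map_pyRange_eq]
  apply List.map_congr_left
  intro kn hkn
  have hk2n : kn < 2 * n + 1 := List.mem_range.mp hkn
  -- index bookkeeping for B's cross product
  set p' : Nat := min kn n with hp'def
  set q' : Nat := kn - p' with hq'def
  have hpn : p' ≤ n := Nat.min_le_right _ _
  have hqn : q' ≤ n := by omega
  have hpq : p' + q' = kn := by omega
  have hmin : min ((kn : Nat) : Int) ((n : Nat) : Int) = ((p' : Nat) : Int) := by
    rw [hp'def]; exact_mod_cast (Nat.cast_min (α := Int) (m := kn) (n := n)).symm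
  have hsub : ((kn : Nat) : Int) - ((p' : Nat) : Int) = ((q' : Nat) : Int) := by
    rw [hq'def]; push_cast [Nat.cast_sub (by omega : p' ≤ kn)]; ring
  simp only [hmin, hsub, PySem.List.pyGetD_natCast]
  rw [krylov_getD _ n _ p' hpn, krylov_getD _ n _ q' hqn]
  obtain ⟨alen, aget⟩ := A_iter mat (nrm n j) hj' kn
  obtain ⟨rlen, rget⟩ := R_iter mat (nrm n j) hj' q'
  obtain ⟨llen, lget⟩ := L_iter mat (nrm n i) hi' p'
  -- A's entry, at the normalised index
  rw [pyGetD_nrm _ _ _ (by rw [alen]; simpa using hi1) (by rw [alen]; simpa using hi2), alen]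
  -- B's entry: the plain fold is a sum
  rw [plainFold_eq (fun r =>
    PySem.List.pyGetD ((leftStep mat)^[p'] ((List.replicate n 0).set (nrm n i) 1)) r 0 *
    PySem.List.pyGetD ((rightStep mat)^[q'] ((List.replicate n 0).set (nrm n j) 1)) r 0), zero_add]
  -- congruence of the cross product with dualS p' q'
  have hS : (∑ r ∈ Finset.range n,
      PySem.List.pyGetD ((leftStep mat)^[p'] ((List.replicate n 0).set (nrm n i) 1)) (r : Int) 0 *
      PySem.List.pyGetD ((rightStep mat)^[q'] ((List.replicate n 0).set (nrm n j) 1)) (r : Int) 0)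
      ≡ dualS (ent mat) n (nrm n i) (nrm n j) p' q' [ZMOD pvMOD] := by
    apply sum_modeq
    intro r hr
    rw [PySem.List.pyGetD_natCast, PySem.List.pyGetD_natCast]
    exact (lget r (Finset.mem_range.mp hr)).mul (rget r (Finset.mem_range.mp hr))
  -- A's entry is a canonical residue
  have hA := aget (nrm n i) hi'
  have hA_canon : ((multMatVec mat)^[kn] ((List.replicate n 0).set (nrm n j) 1)).getD (nrm n i) 0
      % pvMOD =
      ((multMatVec mat)^[kn] ((List.replicate n 0).set (nrm n j) 1)).getD (nrm n i) 0 := by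
    cases kn with
    | zero =>
      rw [Function.iterate_zero_apply, init_getD _ _ _ hj']
      unfold delta
      split <;> decide
    | succ s =>
      rw [Function.iterate_succ_apply']
      exact A_canon mat _ _ hi'
  calc ((multMatVec mat)^[kn] ((List.replicate n 0).set (nrm n j) 1)).getD (nrm n i) 0
      = ((multMatVec mat)^[kn] ((List.replicate n 0).set (nrm n j) 1)).getD (nrm n i) 0 % pvMOD :=
        hA_canon.symm
    _ = colIt (ent mat) n (delta (nrm n j)) kn (nrm n i) % pvMOD := hA
    _ = rowIt (ent mat) n (delta (nrm n i)) kn (nrm n j) % pvMOD := by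
        rw [dual (ent mat) n (nrm n i) (nrm n j) hi' hj' kn]
    _ = dualS (ent mat) n (nrm n i) (nrm n j) p' q' % pvMOD := by
        rw [dualS_shift, hpq, dualS_right (ent mat) n (nrm n i) (nrm n j) hj' kn]
    _ = (∑ r ∈ Finset.range n,
          PySem.List.pyGetD ((leftStep mat)^[p'] ((List.replicate n 0).set (nrm n i) 1)) (r : Int) 0 *
          PySem.List.pyGetD ((rightStep mat)^[q'] ((List.replicate n 0).set (nrm n j) 1)) (r : Int) 0)
          % pvMOD := hS.symm
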